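-- pv_equiv track=rewrite | github.com/FanchenBao/leetcode | LeetCode_2812.py | bfs
-- ===== SOURCE A (Python) =====
-- from typing import List
--
-- def bfs(thresh: int, manhattan: List[List[int]]) -> bool:
--     if manhattan[0][0] < thresh:
--         return False
--     N = len(manhattan)
--     queue = [(0, 0, manhattan[0][0])]
--     visited = [[0] * N for _ in range(N)]
--     visited[0][0] = 1
--     while queue:
--         tmp = []
--         for i, j, s in queue:
--             if i == N - 1 and j == N - 1:
--                 return True
--             for di, dj in [(0, 1), (0, -1), (-1, 0), (1, 0)]:
--                 ni, nj = i + di, j + dj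
--                 if 0 <= ni < N and 0 <= nj < N and not visited[ni][nj]:
--                     next_s = min(s, manhattan[ni][nj])
--                     if next_s >= thresh:
--                         tmp.append((ni, nj, next_s))
--                         visited[ni][nj] = 1
--         queue = tmp
--     return False
-- ===== SOURCE B (Python) =====
-- from typing import List
--
--
-- def bfs(thresh: int, manhattan: List[List[int]]) -> bool:
--     # Dynamic-programming fixpoint instead of frontier BFS: iterate a pure
--     # boolean-matrix recurrence (cell reachable <- any reachable neighbour and
--     # cell value >= thresh) N*N times; no queue, no visited set, no running min.
--     if manhattan[0][0] < thresh:
--         return False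
--     N = len(manhattan)
--     ok = [[manhattan[i][j] >= thresh for j in range(N)] for i in range(N)]
--     reach = [[i == 0 and j == 0 for j in range(N)] for i in range(N)]
--     for _ in range(N * N):
--         reach = [
--             [
--                 reach[i][j]
--                 or (
--                     ok[i][j]
--                     and (
--                         (i > 0 and reach[i - 1][j])
--                         or (i + 1 < N and reach[i + 1][j])
--                         or (j > 0 and reach[i][j - 1])
--                         or (j + 1 < N and reach[i][j + 1])
--                     )
--                 )
--                 for j in range(N)
--             ]
--             for i in range(N)
--         ]
--     return reach[N - 1][N - 1]
-- ===== Notes on version B (the rewrite author's own statement) =====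
-- stated objective: alternative
-- what changed: Replaces the frontier BFS (queue of (i,j,running-min) triples plus a visited matrix, early return on popping the goal) by a dynamic-programming fixpoint: a pure boolean reachability matrix is rebuilt N*N times by a local recurrence (cell reachable iff already reachable, or its value >= thresh and some neighbour reachable), then the goal entry is read off; no queue, no visited set, no running minimum.
-- outside the precondition, e.g. on bfs(5, [[5, 0], [0]]): A returns False, B raises IndexError
import Mathlib
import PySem

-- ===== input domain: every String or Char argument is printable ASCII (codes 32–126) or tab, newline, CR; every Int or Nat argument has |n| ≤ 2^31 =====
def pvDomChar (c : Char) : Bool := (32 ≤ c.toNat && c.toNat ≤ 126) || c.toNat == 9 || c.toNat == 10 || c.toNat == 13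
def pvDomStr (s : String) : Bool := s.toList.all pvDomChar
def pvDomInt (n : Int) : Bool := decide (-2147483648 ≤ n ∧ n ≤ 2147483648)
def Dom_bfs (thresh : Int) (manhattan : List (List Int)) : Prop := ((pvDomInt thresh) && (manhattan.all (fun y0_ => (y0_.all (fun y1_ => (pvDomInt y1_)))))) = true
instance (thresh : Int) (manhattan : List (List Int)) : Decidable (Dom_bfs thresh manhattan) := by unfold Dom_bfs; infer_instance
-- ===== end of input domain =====

-- B replaces A's frontier BFS (queue + visited + running min) by a dynamic-programming
-- fixpoint: a pure boolean reachability matrix rebuilt N*N times by a local recurrence.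

-- shared 2-d indexing helper: m[i][j] with Python index semantics, default 0 outside
def pvGet2 (m : List (List Int)) (i j : Int) : Int :=
  PySem.List.pyGetD (PySem.List.pyGetD m i []) j 0

-- ===== PORT A =====
def pvDirs : List (Int × Int) := [(0,1),(0,-1),(-1,0),(1,0)]

-- visited[ni][nj] = 1 (indices are guarded 0 ≤ ni < N, so .toNat is exact here)
def pvVisSet (vis : List (List Int)) (i j : Int) : List (List Int) :=
  vis.modify i.toNat (fun row => row.set j.toNat 1)

-- the inner 'for di, dj in [...]' of A
def pvStepEntry (thresh N : Int) (man : List (List Int)) (i j s : Int)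
    (acc : List (Int × Int × Int) × List (List Int)) : List (Int × Int × Int) × List (List Int) :=
  pvDirs.foldl (fun acc d =>
    let ni := i + d.1
    let nj := j + d.2
    if 0 ≤ ni ∧ ni < N ∧ 0 ≤ nj ∧ nj < N ∧ pvGet2 acc.2 ni nj = 0 then
      let nexts := min s (pvGet2 man ni nj)
      if thresh ≤ nexts then (acc.1 ++ [(ni, nj, nexts)], pvVisSet acc.2 ni nj)
      else acc
    else acc) acc

-- the 'for i, j, s in queue' of A; none = the Python 'return True'
def pvScan (thresh N : Int) (man : List (List Int)) :
    List (Int × Int × Int) → List (Int × Int × Int) × List (List Int) →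
    Option (List (Int × Int × Int) × List (List Int))
  | [], acc => some acc
  | (i, j, s) :: rest, acc =>
    if i = N - 1 ∧ j = N - 1 then none
    else pvScan thresh N man rest (pvStepEntry thresh N man i j s acc)

-- the 'while queue' of A; fuel N*N+1 always suffices (proved below), so this is exact
def pvLoop (thresh N : Int) (man : List (List Int)) :
    Nat → List (Int × Int × Int) → List (List Int) → Bool
  | 0, _, _ => false
  | fuel + 1, queue, vis =>
    if queue.isEmpty then false
    else match pvScan thresh N man queue ([], vis) with
      | none => true
      | some (tmp, vis') => pvLoop thresh N man fuel tmp vis'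

def bfs (thresh : Int) (manhattan : List (List Int)) : Bool :=
  if pvGet2 manhattan 0 0 < thresh then false
  else
    pvLoop thresh (manhattan.length : Int) manhattan
      (manhattan.length * manhattan.length + 1)
      [(0, 0, pvGet2 manhattan 0 0)]
      (pvVisSet (List.replicate manhattan.length (List.replicate manhattan.length (0 : Int))) 0 0)

-- ===== PORT B =====
def pvGetB (r : List (List Bool)) (i j : Int) : Bool :=
  PySem.List.pyGetD (PySem.List.pyGetD r i []) j false

-- one rebuild of the reachability matrix (the big comprehension in B)
def pvExpand (N : Int) (ok reach : List (List Bool)) : List (List Bool) :=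
  (PySem.List.pyRange 0 N 1).map (fun i =>
    (PySem.List.pyRange 0 N 1).map (fun j =>
      pvGetB reach i j ||
        (pvGetB ok i j &&
          ((decide (0 < i) && pvGetB reach (i-1) j) ||
           (decide (i+1 < N) && pvGetB reach (i+1) j) ||
           (decide (0 < j) && pvGetB reach i (j-1)) ||
           (decide (j+1 < N) && pvGetB reach i (j+1))))))

def bfs_alt (thresh : Int) (manhattan : List (List Int)) : Bool :=
  if pvGet2 manhattan 0 0 < thresh then false
  else
    let N : Int := manhattan.length
    let ok := (PySem.List.pyRange 0 N 1).map (fun i =>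
      (PySem.List.pyRange 0 N 1).map (fun j => decide (thresh ≤ pvGet2 manhattan i j)))
    let reach0 := (PySem.List.pyRange 0 N 1).map (fun i =>
      (PySem.List.pyRange 0 N 1).map (fun j => decide (i = 0) && decide (j = 0)))
    let final := (List.range (manhattan.length * manhattan.length)).foldl
      (fun r _ => pvExpand N ok r) reach0
    pvGetB final (N - 1) (N - 1)

-- ===== PRECONDITION & SPEC =====
-- Pre_ excludes the inputs on which A raises IndexError (empty grid, empty first row,
-- and — when the start cell passes the threshold — any row shorter than the grid) ;
-- stated narrowing: on a ragged grid whose short rows are unreachable A happens to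
-- return, but B scans every cell of the square and raises there, so ragged grids with
-- start ≥ thresh are excluded even when A returns.
def Pre_bfs (thresh : Int) (manhattan : List (List Int)) : Prop :=
  manhattan ≠ [] ∧ manhattan.headD [] ≠ [] ∧
    ((manhattan.headD []).headD 0 < thresh ∨ ∀ row ∈ manhattan, manhattan.length ≤ row.length)

instance (thresh : Int) (manhattan : List (List Int)) : Decidable (Pre_bfs thresh manhattan) := by
  unfold Pre_bfs; infer_instance

def pvWitness_bfs : Int × List (List Int) := (0, [[1]])

def Spec_bfs (thresh : Int) (manhattan : List (List Int)) (out : Bool) : Prop := out = bfs_alt thresh manhattan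
instance (thresh : Int) (manhattan : List (List Int)) (out : Bool) : Decidable (Spec_bfs thresh manhattan out) := by unfold Spec_bfs; infer_instance

-- ===== CLAIM (what is proved, stated in full; the proofs are below) =====
def Claim_equal_bfs : Prop := ∀ (thresh : Int) (manhattan : List (List Int)), Dom_bfs thresh manhattan → Pre_bfs thresh manhattan → Spec_bfs thresh manhattan (bfs thresh manhattan)

-- ===== LEMMAS AND PROOFS =====

-- ===== proof-side model =====
def pvGrid (N : Int) : Finset (Int × Int) :=
  ((Finset.range N.toNat) ×ˢ (Finset.range N.toNat)).image (fun p => ((p.1 : Int), (p.2 : Int)))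

def pvAdjB (c d : Int × Int) : Bool :=
  (c.1 == d.1 && (c.2 == d.2 + 1 || d.2 == c.2 + 1)) ||
  (c.2 == d.2 && (c.1 == d.1 + 1 || d.1 == c.1 + 1))

def pvF (thresh N : Int) (man : List (List Int)) (S : Finset (Int × Int)) : Finset (Int × Int) :=
  S ∪ (pvGrid N).filter (fun c => thresh ≤ pvGet2 man c.1 c.2 ∧ ∃ d ∈ S, pvAdjB c d)

def pvMat (N : Int) (S : Finset (Int × Int)) : List (List Bool) :=
  (PySem.List.pyRange 0 N 1).map (fun i =>
    (PySem.List.pyRange 0 N 1).map (fun j => decide ((i, j) ∈ S)))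

lemma mem_pvGrid {N : Int} {c : Int × Int} :
    c ∈ pvGrid N ↔ 0 ≤ c.1 ∧ c.1 < N ∧ 0 ≤ c.2 ∧ c.2 < N := by
  simp only [pvGrid, Finset.mem_image, Finset.mem_product, Finset.mem_range]
  constructor
  · rintro ⟨p, ⟨h1, h2⟩, rfl⟩
    refine ⟨Int.natCast_nonneg _, ?_, Int.natCast_nonneg _, ?_⟩ <;> omega
  · rintro ⟨h1, h2, h3, h4⟩
    refine ⟨(c.1.toNat, c.2.toNat), ⟨by omega, by omega⟩, ?_⟩
    obtain ⟨x, y⟩ := c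
    simp only [Prod.mk.injEq]
    constructor <;> omega

lemma pvF_subset_grid {thresh N : Int} {man : List (List Int)} {S : Finset (Int × Int)}
    (h : S ⊆ pvGrid N) : pvF thresh N man S ⊆ pvGrid N := by
  intro c hc
  rcases Finset.mem_union.1 hc with h1 | h1
  · exact h h1
  · exact Finset.mem_of_mem_filter _ h1

lemma subset_pvF (thresh N : Int) (man : List (List Int)) (S : Finset (Int × Int)) :
    S ⊆ pvF thresh N man S := Finset.subset_union_left

lemma pvGetB_pvMat {N : Int} {S : Finset (Int × Int)} {i j : Int}
    (hi0 : 0 ≤ i) (hiN : i < N) (hj0 : 0 ≤ j) (hjN : j < N) :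
    pvGetB (pvMat N S) i j = decide ((i, j) ∈ S) := by
  unfold pvGetB pvMat
  rw [PySem.List.pyGetD_map_pyRange_of_nonneg _ N i [] hi0 hiN,
      PySem.List.pyGetD_map_pyRange_of_nonneg _ N j false hj0 hjN]

lemma exists_adj_iff {N : Int} {S : Finset (Int × Int)} (hS : S ⊆ pvGrid N) (i j : Int) :
    (∃ d ∈ S, pvAdjB (i, j) d = true) ↔
      ((0 < i ∧ (i-1, j) ∈ S) ∨ (i+1 < N ∧ (i+1, j) ∈ S) ∨
       (0 < j ∧ (i, j-1) ∈ S) ∨ (j+1 < N ∧ (i, j+1) ∈ S)) := by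
  constructor
  · rintro ⟨⟨a, b⟩, hd, hadj⟩
    have hg := mem_pvGrid.1 (hS hd)
    simp only [pvAdjB, Bool.or_eq_true, Bool.and_eq_true, beq_iff_eq] at hadj
    simp only at hg
    rcases hadj with ⟨h1, h2 | h2⟩ | ⟨h1, h2 | h2⟩
    · refine Or.inr (Or.inr (Or.inl ⟨by omega, ?_⟩))
      have he : ((i : Int), j - 1) = (a, b) := by simp only [Prod.mk.injEq]; omega
      rw [he]; exact hd
    · refine Or.inr (Or.inr (Or.inr ⟨by omega, ?_⟩))
      have he : ((i : Int), j + 1) = (a, b) := by simp only [Prod.mk.injEq]; omega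
      rw [he]; exact hd
    · refine Or.inl ⟨by omega, ?_⟩
      have he : ((i : Int) - 1, j) = (a, b) := by simp only [Prod.mk.injEq]; omega
      rw [he]; exact hd
    · refine Or.inr (Or.inl ⟨by omega, ?_⟩)
      have he : ((i : Int) + 1, j) = (a, b) := by simp only [Prod.mk.injEq]; omega
      rw [he]; exact hd
  · rintro (⟨h, hd⟩ | ⟨h, hd⟩ | ⟨h, hd⟩ | ⟨h, hd⟩) <;>
      refine ⟨_, hd, ?_⟩ <;> simp [pvAdjB]

lemma mem_pvF_iff {thresh N : Int} {man : List (List Int)} {S : Finset (Int × Int)}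
    (hS : S ⊆ pvGrid N) {i j : Int} (hi0 : 0 ≤ i) (hiN : i < N) (hj0 : 0 ≤ j) (hjN : j < N) :
    ((i, j) ∈ pvF thresh N man S) ↔
      ((i, j) ∈ S ∨ (thresh ≤ pvGet2 man i j ∧
        ((0 < i ∧ (i-1, j) ∈ S) ∨ (i+1 < N ∧ (i+1, j) ∈ S) ∨
         (0 < j ∧ (i, j-1) ∈ S) ∨ (j+1 < N ∧ (i, j+1) ∈ S)))) := by
  unfold pvF
  rw [Finset.mem_union, Finset.mem_filter]
  rw [show ((i, j) ∈ pvGrid N) ↔ True by simp [mem_pvGrid]; omega]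
  rw [← exists_adj_iff hS i j]
  simp

lemma pvExpand_pvMat (thresh N : Int) (man : List (List Int)) (S : Finset (Int × Int))
    (hS : S ⊆ pvGrid N) :
    pvExpand N ((PySem.List.pyRange 0 N 1).map (fun i =>
        (PySem.List.pyRange 0 N 1).map (fun j => decide (thresh ≤ pvGet2 man i j)))) (pvMat N S)
      = pvMat N (pvF thresh N man S) := by
  unfold pvExpand
  conv_rhs => unfold pvMat
  refine List.map_congr_left (fun i hi => ?_)
  refine List.map_congr_left (fun j hj => ?_)
  rw [PySem.List.mem_pyRange_one] at hi hj
  have hok : pvGetB ((PySem.List.pyRange 0 N 1).map (fun i =>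
      (PySem.List.pyRange 0 N 1).map (fun j => decide (thresh ≤ pvGet2 man i j)))) i j
      = decide (thresh ≤ pvGet2 man i j) := by
    unfold pvGetB
    rw [PySem.List.pyGetD_map_pyRange_of_nonneg _ N i [] hi.1 hi.2,
        PySem.List.pyGetD_map_pyRange_of_nonneg _ N j false hj.1 hj.2]
  rw [hok, pvGetB_pvMat hi.1 hi.2 hj.1 hj.2]
  have g1 : (decide (0 < i) && pvGetB (pvMat N S) (i-1) j) = decide (0 < i ∧ (i-1, j) ∈ S) := by
    by_cases h : 0 < i
    · rw [pvGetB_pvMat (by omega) (by omega) hj.1 hj.2]; simp [h]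
    · simp [h]
  have g2 : (decide (i+1 < N) && pvGetB (pvMat N S) (i+1) j) = decide (i+1 < N ∧ (i+1, j) ∈ S) := by
    by_cases h : i + 1 < N
    · rw [pvGetB_pvMat (by omega) (by omega) hj.1 hj.2]; simp [h]
    · simp [h]
  have g3 : (decide (0 < j) && pvGetB (pvMat N S) i (j-1)) = decide (0 < j ∧ (i, j-1) ∈ S) := by
    by_cases h : 0 < j
    · rw [pvGetB_pvMat hi.1 hi.2 (by omega) (by omega)]; simp [h]
    · simp [h]
  have g4 : (decide (j+1 < N) && pvGetB (pvMat N S) i (j+1)) = decide (j+1 < N ∧ (i, j+1) ∈ S) := by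
    by_cases h : j + 1 < N
    · rw [pvGetB_pvMat hi.1 hi.2 (by omega) (by omega)]; simp [h]
    · simp [h]
  rw [g1, g2, g3, g4]
  simp only [← Bool.decide_or, ← Bool.decide_and]
  rw [decide_eq_decide]
  rw [mem_pvF_iff hS hi.1 hi.2 hj.1 hj.2]
  tauto

lemma reach0_eq_pvMat (N : Int) :
    (PySem.List.pyRange 0 N 1).map (fun i =>
      (PySem.List.pyRange 0 N 1).map (fun j => decide (i = 0) && decide (j = 0)))
      = pvMat N ({((0:Int), (0:Int))} : Finset (Int × Int)) := by
  unfold pvMat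
  refine List.map_congr_left (fun i _ => List.map_congr_left (fun j _ => ?_))
  simp [Prod.ext_iff]

lemma pvF_iterate_subset_grid (thresh N : Int) (man : List (List Int))
    {S : Finset (Int × Int)} (hS : S ⊆ pvGrid N) (k : ℕ) :
    (pvF thresh N man)^[k] S ⊆ pvGrid N := by
  induction k generalizing S with
  | zero => exact hS
  | succ k ih => rw [Function.iterate_succ_apply]; exact ih (pvF_subset_grid hS)

lemma foldl_expand_eq (thresh N : Int) (man : List (List Int))
    {S : Finset (Int × Int)} (hS : S ⊆ pvGrid N) (k : ℕ) :
    (List.range k).foldl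
      (fun r _ => pvExpand N ((PySem.List.pyRange 0 N 1).map (fun i =>
        (PySem.List.pyRange 0 N 1).map (fun j => decide (thresh ≤ pvGet2 man i j)))) r)
      (pvMat N S)
      = pvMat N ((pvF thresh N man)^[k] S) := by
  induction k with
  | zero => simp
  | succ k ih =>
      rw [List.range_succ, List.foldl_append, ih, Function.iterate_succ_apply']
      exact pvExpand_pvMat thresh N man _ (pvF_iterate_subset_grid thresh N man hS k)

lemma bfs_alt_eq (thresh : Int) (man : List (List Int)) (hn : 1 ≤ man.length)
    (hth : ¬ pvGet2 man 0 0 < thresh) :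
    bfs_alt thresh man
      = decide ((((man.length : Int) - 1), ((man.length : Int) - 1))
          ∈ (pvF thresh (man.length : Int) man)^[man.length * man.length] {((0:Int), (0:Int))}) := by
  unfold bfs_alt
  rw [if_neg hth]
  dsimp only
  have h00 : ({((0:Int), (0:Int))} : Finset (Int × Int)) ⊆ pvGrid (man.length : Int) := by
    intro c hc
    rw [Finset.mem_singleton] at hc
    subst hc
    rw [mem_pvGrid]
    dsimp only
    have : (1 : Int) ≤ (man.length : Int) := by exact_mod_cast hn
    refine ⟨le_refl _, by omega, le_refl _, by omega⟩
  rw [reach0_eq_pvMat, foldl_expand_eq thresh _ man h00]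
  exact pvGetB_pvMat (by omega) (by omega) (by omega) (by omega)

lemma pvF_stable (thresh N : Int) (man : List (List Int)) {S : Finset (Int × Int)}
    (h : pvF thresh N man S = S) (m : ℕ) : (pvF thresh N man)^[m] S = S := by
  induction m with
  | zero => rfl
  | succ m ih => rw [Function.iterate_succ_apply', ih, h]

lemma pvF_iterate_mono (thresh N : Int) (man : List (List Int)) (S : Finset (Int × Int))
    {a b : ℕ} (h : a ≤ b) : (pvF thresh N man)^[a] S ⊆ (pvF thresh N man)^[b] S := by
  induction b with
  | zero => simp_all
  | succ b ih =>
      rcases Nat.lt_or_ge a (b+1) with hb | hb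
      · exact (ih (by omega)).trans
          (by rw [Function.iterate_succ_apply']; exact subset_pvF _ _ _ _)
      · have : a = b + 1 := by omega
        subst this; exact subset_refl _

lemma pvF_chain_card (thresh N : Int) (man : List (List Int)) (S : Finset (Int × Int)) (K : ℕ)
    (h : ∀ j < K, (pvF thresh N man)^[j+1] S ≠ (pvF thresh N man)^[j] S) :
    K + S.card ≤ ((pvF thresh N man)^[K] S).card := by
  induction K with
  | zero => simp
  | succ K ih =>
      have h1 := ih (fun j hj => h j (by omega))
      have h2 : ((pvF thresh N man)^[K] S) ⊂ ((pvF thresh N man)^[K+1] S) :=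
        HasSubset.Subset.ssubset_of_ne (pvF_iterate_mono thresh N man S (by omega))
          (Ne.symm (h K (by omega)))
      have := Finset.card_lt_card h2
      omega

lemma card_pvGrid (N : Int) : (pvGrid N).card = N.toNat * N.toNat := by
  unfold pvGrid
  rw [Finset.card_image_of_injective _ (fun a b hab => by
    simpa [Prod.ext_iff, Int.natCast_inj] using hab)]
  simp [Finset.card_product]

lemma exists_mem_iterate_iff (thresh : Int) (man : List (List Int)) (n : ℕ)
    {S : Finset (Int × Int)} (hS : S ⊆ pvGrid (n : Int)) (hS1 : 1 ≤ S.card) (x : Int × Int) :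
    (∃ m, x ∈ (pvF thresh (n : Int) man)^[m] S) ↔
      x ∈ (pvF thresh (n : Int) man)^[n*n] S := by
  constructor
  · rintro ⟨m, hm⟩
    -- find a stabilization point k < n*n
    by_cases hstab : ∀ j < n*n, (pvF thresh (n : Int) man)^[j+1] S ≠ (pvF thresh (n : Int) man)^[j] S
    · have hcard := pvF_chain_card thresh (n : Int) man S (n*n) hstab
      have hsub := pvF_iterate_subset_grid thresh (n : Int) man hS (n*n)
      have := Finset.card_le_card hsub
      rw [card_pvGrid] at this
      simp only [Int.toNat_natCast] at this
      omega
    · push Not at hstab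
      obtain ⟨k, hk, heq⟩ := hstab
      have hfix : pvF thresh (n : Int) man ((pvF thresh (n : Int) man)^[k] S)
          = (pvF thresh (n : Int) man)^[k] S :=
        (Function.iterate_succ_apply' (pvF thresh (n : Int) man) k S).symm.trans heq
      rcases Nat.le_total m k with hmk | hmk
      · exact (pvF_iterate_mono _ _ _ _ (hmk.trans (Nat.le_of_lt hk))) hm
      · have h1 : (pvF thresh (n : Int) man)^[m] S = (pvF thresh (n : Int) man)^[k] S := by
          rw [show m = (m - k) + k by omega, Function.iterate_add_apply]
          exact pvF_stable _ _ _ hfix _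
        rw [h1] at hm
        exact (pvF_iterate_mono _ _ _ _ (by omega : k ≤ n*n)) hm
  · exact fun h => ⟨n*n, h⟩

-- ===== A-side model =====
def pvVisRep (n : ℕ) (vis : List (List Int)) (V : Finset (Int × Int)) : Prop :=
  vis.length = n ∧ (∀ row ∈ vis, row.length = n) ∧
  ∀ i j : Int, 0 ≤ i → i < (n : Int) → 0 ≤ j → j < (n : Int) →
    (pvGet2 vis i j ≠ 0 ↔ (i, j) ∈ V)

lemma pvGet2_eq_getElem {vis : List (List Int)} {n : ℕ} (hlen : vis.length = n)
    (hrows : ∀ row ∈ vis, row.length = n) {i j : Int}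
    (hi0 : 0 ≤ i) (hiN : i < (n : Int)) (hj0 : 0 ≤ j) (_hjN : j < (n : Int)) :
    pvGet2 vis i j = (vis[i.toNat]'(by omega))[j.toNat]'(by
      rw [hrows _ (List.getElem_mem _)]; omega) := by
  unfold pvGet2
  rw [PySem.List.pyGetD_eq_getElem vis [] hi0 (by omega),
      PySem.List.pyGetD_eq_getElem _ 0 hj0 (by rw [hrows _ (List.getElem_mem _)]; omega)]

lemma pvVisRep_set {n : ℕ} {vis : List (List Int)} {V : Finset (Int × Int)}
    (h : pvVisRep n vis V) {i j : Int}
    (hi0 : 0 ≤ i) (_hiN : i < (n : Int)) (hj0 : 0 ≤ j) (_hjN : j < (n : Int)) :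
    pvVisRep n (pvVisSet vis i j) (V ∪ {(i, j)}) := by
  obtain ⟨hlen, hrows, hmem⟩ := h
  have hlen' : (pvVisSet vis i j).length = n := by simp [pvVisSet, hlen]
  have hrows' : ∀ row ∈ pvVisSet vis i j, row.length = n := by
    intro row hrow
    unfold pvVisSet at hrow
    rw [List.mem_iff_getElem] at hrow
    obtain ⟨k, hk, rfl⟩ := hrow
    rw [List.getElem_modify]
    split
    · rw [List.length_set]
      exact hrows _ (List.getElem_mem _)
    · exact hrows _ (List.getElem_mem _)
  refine ⟨hlen', hrows', ?_⟩
  intro a b ha0 haN hb0 hbN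
  have hm := hmem a b ha0 haN hb0 hbN
  rw [pvGet2_eq_getElem hlen hrows ha0 haN hb0 hbN] at hm
  rw [pvGet2_eq_getElem hlen' hrows' ha0 haN hb0 hbN]
  unfold pvVisSet
  simp only [List.getElem_modify]
  by_cases hia : i.toNat = a.toNat
  · by_cases hjb : j.toNat = b.toNat
    · have heq : (a, b) = (i, j) := by simp only [Prod.mk.injEq]; omega
      simp [hia, hjb, heq]
    · have hne : (a, b) ≠ (i, j) := by simp only [ne_eq, Prod.mk.injEq]; omega
      simp [hia, hjb, hne, hm]
  · have hne : (a, b) ≠ (i, j) := by simp only [ne_eq, Prod.mk.injEq]; omega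
    simp [hia, hne, hm]

def pvTryAdd (thresh N : Int) (man : List (List Int)) (s : Int)
    (acc : List (Int × Int × Int) × List (List Int)) (c : Int × Int) :
    List (Int × Int × Int) × List (List Int) :=
  if 0 ≤ c.1 ∧ c.1 < N ∧ 0 ≤ c.2 ∧ c.2 < N ∧ pvGet2 acc.2 c.1 c.2 = 0 then
    if thresh ≤ min s (pvGet2 man c.1 c.2) then
      (acc.1 ++ [(c.1, c.2, min s (pvGet2 man c.1 c.2))], pvVisSet acc.2 c.1 c.2)
    else acc
  else acc

def pvCoords (l : List (Int × Int × Int)) : List (Int × Int) := l.map (fun e => (e.1, e.2.1))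

def pvNew (thresh N : Int) (man : List (List Int)) (cs : List (Int × Int)) : Finset (Int × Int) :=
  cs.toFinset.filter (fun c => c ∈ pvGrid N ∧ thresh ≤ pvGet2 man c.1 c.2)

lemma pvTryAdd_spec {thresh N : Int} {man : List (List Int)} {s : Int}
    {n : ℕ} (hN : N = (n : Int)) {tmp : List (Int × Int × Int)} {vis : List (List Int)}
    {V : Finset (Int × Int)} (hrep : pvVisRep n vis V) (hs : thresh ≤ s) (c : Int × Int) :
    pvTryAdd thresh N man s (tmp, vis) c =
      if c ∈ pvGrid N ∧ thresh ≤ pvGet2 man c.1 c.2 then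
        (if c ∈ V then (tmp, vis)
         else (tmp ++ [(c.1, c.2, min s (pvGet2 man c.1 c.2))], pvVisSet vis c.1 c.2))
      else (tmp, vis) := by
  obtain ⟨hlen, hrows, hmem⟩ := hrep
  unfold pvTryAdd
  dsimp only
  simp only [mem_pvGrid]
  by_cases hb : 0 ≤ c.1 ∧ c.1 < N ∧ 0 ≤ c.2 ∧ c.2 < N
  · obtain ⟨h1, h2, h3, h4⟩ := hb
    have hv := hmem c.1 c.2 h1 (by omega) h3 (by omega)
    by_cases hV : c ∈ V
    · have hnv : ¬ pvGet2 vis c.1 c.2 = 0 := hv.mpr hV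
      by_cases hg : thresh ≤ pvGet2 man c.1 c.2
      · rw [if_neg (by tauto), if_pos (by tauto), if_pos hV]
      · rw [if_neg (by tauto), if_neg (by tauto)]
    · have hv0 : pvGet2 vis c.1 c.2 = 0 := by
        by_contra hc
        exact hV (hv.1 hc)
      rw [if_pos (by tauto)]
      by_cases hg : thresh ≤ pvGet2 man c.1 c.2
      · rw [if_pos (by omega : thresh ≤ min s (pvGet2 man c.1 c.2)),
            if_pos (by tauto), if_neg hV]
      · rw [if_neg (by omega : ¬ thresh ≤ min s (pvGet2 man c.1 c.2)), if_neg (by tauto)]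
  · rw [if_neg (by tauto), if_neg (by tauto)]

lemma pvFoldTryAdd_spec {thresh N : Int} {man : List (List Int)} {s : Int}
    {n : ℕ} (hN : N = (n : Int)) (hs : thresh ≤ s) (cs : List (Int × Int)) :
    ∀ (tmp : List (Int × Int × Int)) (vis : List (List Int)) (V : Finset (Int × Int)),
      pvVisRep n vis V →
      ∃ L vis', cs.foldl (pvTryAdd thresh N man s) (tmp, vis) = (tmp ++ L, vis') ∧
        pvVisRep n vis' (V ∪ pvNew thresh N man cs) ∧
        (pvCoords L).Nodup ∧
        (pvCoords L).toFinset = pvNew thresh N man cs \ V ∧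
        (∀ e ∈ L, thresh ≤ e.2.2) := by
  induction cs with
  | nil =>
      intro tmp vis V hrep
      refine ⟨[], vis, by simp, ?_, by simp [pvCoords], by simp [pvNew, pvCoords], by simp⟩
      simpa [pvNew] using hrep
  | cons c cs ih =>
      intro tmp vis V hrep
      rw [List.foldl_cons, pvTryAdd_spec hN hrep hs c]
      have hsplit : pvNew thresh N man (c :: cs)
          = (if c ∈ pvGrid N ∧ thresh ≤ pvGet2 man c.1 c.2 then {c} else ∅)
            ∪ pvNew thresh N man cs := by
        unfold pvNew
        ext x
        by_cases hc : c ∈ pvGrid N ∧ thresh ≤ pvGet2 man c.1 c.2 <;>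
          by_cases hxc : x = c <;>
          simp [Finset.mem_filter, hc, hxc]
      by_cases hP : c ∈ pvGrid N ∧ thresh ≤ pvGet2 man c.1 c.2
      · rw [if_pos hP]
        by_cases hV : c ∈ V
        · rw [if_pos hV]
          obtain ⟨L, vis', heq, hrep', hnd, hset, hth⟩ := ih tmp vis V hrep
          refine ⟨L, vis', heq, ?_, hnd, ?_, hth⟩
          · have : V ∪ pvNew thresh N man (c :: cs) = V ∪ pvNew thresh N man cs := by
              rw [hsplit, if_pos hP]; ext x
              simp only [Finset.mem_union, Finset.mem_singleton]
              constructor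
              · rintro (h | h | h) <;> [exact Or.inl h; exact Or.inl (h ▸ hV); exact Or.inr h]
              · tauto
            rw [this]; exact hrep'
          · rw [hset, hsplit, if_pos hP]
            ext x
            simp only [Finset.mem_sdiff, Finset.mem_union, Finset.mem_singleton]
            constructor
            · tauto
            · rintro ⟨h | h, h2⟩ <;> [exact absurd (h ▸ hV) h2; exact ⟨h, h2⟩]
        · rw [if_neg hV]
          have hb := mem_pvGrid.1 hP.1
          have hrep1 : pvVisRep n (pvVisSet vis c.1 c.2) (V ∪ {(c.1, c.2)}) :=
            pvVisRep_set hrep hb.1 (by omega) hb.2.2.1 (by omega)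
          have hrep1' : pvVisRep n (pvVisSet vis c.1 c.2) (V ∪ {c}) := by
            simpa using hrep1
          obtain ⟨L, vis', heq, hrep', hnd, hset, hth⟩ :=
            ih (tmp ++ [(c.1, c.2, min s (pvGet2 man c.1 c.2))]) (pvVisSet vis c.1 c.2)
              (V ∪ {c}) hrep1'
          refine ⟨(c.1, c.2, min s (pvGet2 man c.1 c.2)) :: L, vis', by
            rw [heq]; simp, ?_, ?_, ?_, ?_⟩
          · have : (V ∪ {c}) ∪ pvNew thresh N man cs = V ∪ pvNew thresh N man (c :: cs) := by
              rw [hsplit, if_pos hP]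
              ext x; simp only [Finset.mem_union, Finset.mem_singleton]; tauto
            rw [← this]; exact hrep'
          · simp only [pvCoords, List.map_cons, List.nodup_cons]
            refine ⟨?_, hnd⟩
            intro hc
            have : ((c.1, c.2) : Int × Int) ∈ (pvCoords L).toFinset := by
              simpa [pvCoords] using hc
            rw [hset] at this
            simp at this
          · simp only [pvCoords, List.map_cons, List.toFinset_cons]
            rw [show pvCoords L = L.map (fun e => (e.1, e.2.1)) from rfl] at hset
            rw [hset, hsplit, if_pos hP]
            ext x
            by_cases hxc : x = c <;>
              simp only [Finset.mem_insert, Finset.mem_sdiff, Finset.mem_union,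
                Finset.mem_singleton, hxc] <;> simp [hV]
          · intro e he
            rcases List.mem_cons.1 he with rfl | he
            · exact le_min hs hP.2
            · exact hth e he
      · rw [if_neg hP]
        obtain ⟨L, vis', heq, hrep', hnd, hset, hth⟩ := ih tmp vis V hrep
        have hPn : pvNew thresh N man (c :: cs) = pvNew thresh N man cs := by
          rw [hsplit, if_neg hP]; simp
        refine ⟨L, vis', heq, by rw [hPn]; exact hrep', hnd, by rw [hPn]; exact hset, hth⟩

def pvNbhd (c : Int × Int) : List (Int × Int) :=
  [(c.1, c.2 + 1), (c.1, c.2 - 1), (c.1 - 1, c.2), (c.1 + 1, c.2)]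

lemma pvStepEntry_eq (thresh N : Int) (man : List (List Int)) (i j s : Int)
    (acc : List (Int × Int × Int) × List (List Int)) :
    pvStepEntry thresh N man i j s acc
      = (pvNbhd (i, j)).foldl (pvTryAdd thresh N man s) acc := by
  simp [pvStepEntry, pvDirs, pvNbhd, pvTryAdd, List.foldl, sub_eq_add_neg]

lemma mem_pvNbhd_iff {c d : Int × Int} : c ∈ pvNbhd d ↔ pvAdjB c d = true := by
  obtain ⟨a, b⟩ := c
  obtain ⟨x, y⟩ := d
  simp only [pvNbhd, pvAdjB, List.mem_cons, List.not_mem_nil,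
    Prod.mk.injEq, Bool.or_eq_true, Bool.and_eq_true, beq_iff_eq]
  constructor
  · rintro (⟨rfl, rfl⟩ | ⟨rfl, rfl⟩ | ⟨rfl, rfl⟩ | ⟨rfl, rfl⟩ | h) <;> first | omega | simp at h
  · rintro (⟨rfl, h | h⟩ | ⟨rfl, h | h⟩) <;> omega

def pvNB (thresh N : Int) (man : List (List Int)) : List (Int × Int × Int) → Finset (Int × Int)
  | [] => ∅
  | e :: rest => pvNew thresh N man (pvNbhd (e.1, e.2.1)) ∪ pvNB thresh N man rest

lemma pvScan_spec {thresh N : Int} {man : List (List Int)} {n : ℕ} (hN : N = (n : Int)) :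
    ∀ (q : List (Int × Int × Int)) (tmp : List (Int × Int × Int)) (vis : List (List Int))
      (V : Finset (Int × Int)),
      pvVisRep n vis V → (∀ e ∈ q, thresh ≤ e.2.2) →
      (if ((N - 1, N - 1) : Int × Int) ∈ pvCoords q then
        pvScan thresh N man q (tmp, vis) = none
      else
        ∃ L vis', pvScan thresh N man q (tmp, vis) = some (tmp ++ L, vis') ∧
          pvVisRep n vis' (V ∪ pvNB thresh N man q) ∧
          (pvCoords L).Nodup ∧
          (pvCoords L).toFinset = pvNB thresh N man q \ V ∧
          (∀ e ∈ L, thresh ≤ e.2.2)) := by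
  intro q
  induction q with
  | nil =>
      intro tmp vis V hrep hq
      rw [if_neg (by simp [pvCoords])]
      exact ⟨[], vis, by simp [pvScan], by simpa [pvNB] using hrep, by simp [pvCoords],
        by simp [pvCoords, pvNB], by simp⟩
  | cons e q ih =>
      intro tmp vis V hrep hq
      obtain ⟨i, j, s⟩ := e
      by_cases hend : (i, j) = ((N - 1 : Int), (N - 1 : Int))
      · rw [if_pos (by simp [pvCoords]; exact Or.inl (by simpa using hend.symm))]
        unfold pvScan
        rw [if_pos (by simpa [Prod.ext_iff] using hend)]
      · have hscan : pvScan thresh N man ((i, j, s) :: q) (tmp, vis)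
            = pvScan thresh N man q (pvStepEntry thresh N man i j s (tmp, vis)) := by
          simp only [pvScan]
          rw [if_neg (by simpa [Prod.ext_iff] using hend)]
        rw [pvStepEntry_eq] at hscan
        obtain ⟨L1, vis1, heq1, hrep1, hnd1, hset1, hth1⟩ :=
          pvFoldTryAdd_spec hN (hq (i, j, s) (List.mem_cons_self ..)) (pvNbhd (i, j)) tmp vis V hrep
        have hmem : ((N - 1, N - 1) : Int × Int) ∈ pvCoords ((i, j, s) :: q)
            ↔ ((N - 1, N - 1) : Int × Int) ∈ pvCoords q := by
          simp [pvCoords, Ne.symm hend]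
        have ihq := ih (tmp ++ L1) vis1 (V ∪ pvNew thresh N man (pvNbhd (i, j)))
          hrep1 (fun e he => hq e (by simp [he]))
        by_cases hq2 : ((N - 1, N - 1) : Int × Int) ∈ pvCoords q
        · rw [if_pos (hmem.2 hq2)]
          rw [if_pos hq2] at ihq
          rw [hscan, heq1]
          exact ihq
        · rw [if_neg (fun hc => hq2 (hmem.1 hc))]
          rw [if_neg hq2] at ihq
          obtain ⟨L2, vis2, heq2, hrep2, hnd2, hset2, hth2⟩ := ihq
          refine ⟨L1 ++ L2, vis2, ?_, ?_, ?_, ?_, ?_⟩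
          · rw [hscan, heq1, heq2, List.append_assoc]
          · have : (V ∪ pvNew thresh N man (pvNbhd (i, j))) ∪ pvNB thresh N man q
                = V ∪ pvNB thresh N man ((i, j, s) :: q) := by
              show _ = V ∪ (pvNew thresh N man (pvNbhd ((i,j,s).1, (i,j,s).2.1)) ∪ _)
              ext x
              simp only [Finset.mem_union]
              tauto
            rw [← this]; exact hrep2
          · rw [show pvCoords (L1 ++ L2) = pvCoords L1 ++ pvCoords L2 by simp [pvCoords]]
            rw [List.nodup_append]
            refine ⟨hnd1, hnd2, ?_⟩
            intro x hx1 y hy2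
            rintro rfl
            have h1 : x ∈ (pvCoords L1).toFinset := by simpa using hx1
            have h2 : x ∈ (pvCoords L2).toFinset := by simpa using hy2
            rw [hset1] at h1
            rw [hset2] at h2
            simp only [Finset.mem_sdiff, Finset.mem_union] at h1 h2
            exact h2.2 (Or.inr h1.1)
          · rw [show pvCoords (L1 ++ L2) = pvCoords L1 ++ pvCoords L2 by simp [pvCoords]]
            rw [List.toFinset_append, hset1, hset2]
            show _ = pvNB thresh N man ((i,j,s) :: q) \ V
            rw [show pvNB thresh N man ((i,j,s) :: q)
                = pvNew thresh N man (pvNbhd ((i,j,s).1, (i,j,s).2.1)) ∪ pvNB thresh N man q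
                from rfl]
            ext x
            simp only [Finset.mem_union, Finset.mem_sdiff]
            tauto
          · intro e he
            rcases List.mem_append.1 he with h | h
            · exact hth1 e h
            · exact hth2 e h

lemma pvNB_mem_iff {thresh N : Int} {man : List (List Int)} {q : List (Int × Int × Int)}
    {x : Int × Int} : x ∈ pvNB thresh N man q
      ↔ ∃ e ∈ q, x ∈ pvNew thresh N man (pvNbhd (e.1, e.2.1)) := by
  induction q with
  | nil => simp [pvNB]
  | cons e q ih =>
      simp only [pvNB, Finset.mem_union, List.mem_cons, ih]
      constructor
      · rintro (h | ⟨e', he', hx⟩)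
        · exact ⟨e, Or.inl rfl, h⟩
        · exact ⟨e', Or.inr he', hx⟩
      · rintro ⟨e', rfl | he', hx⟩
        · exact Or.inl hx
        · exact Or.inr ⟨e', he', hx⟩

lemma mem_pvNew_iff {thresh N : Int} {man : List (List Int)} {cs : List (Int × Int)}
    {x : Int × Int} : x ∈ pvNew thresh N man cs
      ↔ x ∈ cs ∧ x ∈ pvGrid N ∧ thresh ≤ pvGet2 man x.1 x.2 := by
  simp [pvNew, Finset.mem_filter]

lemma pvNB_union_eq {thresh N : Int} {man : List (List Int)} {q : List (Int × Int × Int)}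
    {V : Finset (Int × Int)}
    (hQV : (pvCoords q).toFinset ⊆ V)
    (hclosed : pvF thresh N man (V \ (pvCoords q).toFinset) ⊆ V) :
    V ∪ pvNB thresh N man q = pvF thresh N man V := by
  apply Finset.Subset.antisymm
  · apply Finset.union_subset (subset_pvF thresh N man V)
    intro x hx
    obtain ⟨e, he, hxe⟩ := pvNB_mem_iff.1 hx
    rw [mem_pvNew_iff] at hxe
    obtain ⟨hnb, hgrid, hgood⟩ := hxe
    have hdV : ((e.1, e.2.1) : Int × Int) ∈ V :=
      hQV (by simp only [List.mem_toFinset, pvCoords, List.mem_map]; exact ⟨e, he, rfl⟩)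
    unfold pvF
    refine Finset.mem_union_right _ (Finset.mem_filter.2 ⟨hgrid, hgood, ⟨(e.1, e.2.1), hdV, ?_⟩⟩)
    exact mem_pvNbhd_iff.1 hnb
  · intro x hx
    rcases Finset.mem_union.1 hx with h | h
    · exact Finset.mem_union_left _ h
    · rw [Finset.mem_filter] at h
      obtain ⟨hgrid, hgood, d, hdV, hadj⟩ := h
      by_cases hdQ : d ∈ (pvCoords q).toFinset
      · refine Finset.mem_union_right _ ?_
        obtain ⟨e, he, hed⟩ := by
          simpa only [List.mem_toFinset, pvCoords, List.mem_map] using hdQ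
        rw [pvNB_mem_iff]
        refine ⟨e, he, ?_⟩
        rw [mem_pvNew_iff, hed]
        exact ⟨mem_pvNbhd_iff.2 hadj, hgrid, hgood⟩
      · refine Finset.mem_union_left _ (hclosed ?_)
        unfold pvF
        exact Finset.mem_union_right _
          (Finset.mem_filter.2 ⟨hgrid, hgood, ⟨d, Finset.mem_sdiff.2 ⟨hdV, hdQ⟩, hadj⟩⟩)

lemma pvLoop_spec {thresh : Int} {man : List (List Int)} {n : ℕ} :
    ∀ (fuel : ℕ) (q : List (Int × Int × Int)) (vis : List (List Int)) (V : Finset (Int × Int)),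
      pvVisRep n vis V → V ⊆ pvGrid (n : Int) →
      (pvCoords q).Nodup → (pvCoords q).toFinset ⊆ V →
      (∀ e ∈ q, thresh ≤ e.2.2) →
      pvF thresh (n : Int) man (V \ (pvCoords q).toFinset) ⊆ V →
      ((((n : Int) - 1, (n : Int) - 1) : Int × Int) ∈ V →
        (((n : Int) - 1, (n : Int) - 1) : Int × Int) ∈ (pvCoords q).toFinset) →
      (n * n + 2 ≤ V.card + fuel ∨ (q = [] ∧ 1 ≤ fuel)) →
      (pvLoop thresh (n : Int) man fuel q vis = true ↔
        ∃ m, (((n : Int) - 1, (n : Int) - 1) : Int × Int) ∈ (pvF thresh (n : Int) man)^[m] V) := by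
  intro fuel
  induction fuel with
  | zero =>
      intro q vis V hrep hVg hnd hQV hq hclosed hendq hfuel
      exfalso
      have hcard : V.card ≤ n * n := by
        have := Finset.card_le_card hVg
        rwa [card_pvGrid, Int.toNat_natCast] at this
      rcases hfuel with h | ⟨_, h⟩ <;> omega
  | succ fuel ih =>
      intro q vis V hrep hVg hnd hQV hq hclosed hendq hfuel
      by_cases hqe : q = []
      · subst hqe
        have hstable : pvF thresh (n : Int) man V = V := by
          apply Finset.Subset.antisymm
          · simpa [pvCoords] using hclosed
          · exact subset_pvF _ _ _ _
        simp only [pvLoop, List.isEmpty_nil, if_pos]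
        constructor
        · intro h; cases h
        · rintro ⟨m, hm⟩
          rw [pvF_stable thresh (n : Int) man hstable m] at hm
          have := hendq hm
          simp [pvCoords] at this
      · have hscan := pvScan_spec (man := man) (thresh := thresh) (rfl : ((n : Int)) = ((n : Int))) q [] vis V hrep hq
        simp only [pvLoop]
        rw [if_neg (by simpa using hqe)]
        by_cases hqend : (((n : Int) - 1, (n : Int) - 1) : Int × Int) ∈ pvCoords q
        · rw [if_pos hqend] at hscan
          rw [hscan]
          simp only [true_iff]
          exact ⟨0, hQV (by simpa using hqend)⟩
        · rw [if_neg hqend] at hscan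
          obtain ⟨L, vis', heq, hrep', hnd', hset', hth'⟩ := hscan
          rw [List.nil_append] at heq
          rw [heq]
          have hendV : (((n : Int) - 1, (n : Int) - 1) : Int × Int) ∉ V := by
            intro hc
            exact hqend (by simpa using hendq hc)
          have hVF := pvNB_union_eq hQV hclosed
          rw [hVF] at hrep'
          have hset2 : (pvCoords L).toFinset = pvF thresh (n : Int) man V \ V := by
            rw [hset', ← hVF]
            ext x
            simp only [Finset.mem_sdiff, Finset.mem_union]
            tauto
          have hsubFV : V ⊆ pvF thresh (n : Int) man V := subset_pvF _ _ _ _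
          have hcard : V.card ≤ n * n := by
            have := Finset.card_le_card hVg
            rwa [card_pvGrid, Int.toNat_natCast] at this
          have htrans : (∃ m, (((n : Int) - 1, (n : Int) - 1) : Int × Int)
                ∈ (pvF thresh (n : Int) man)^[m] V)
              ↔ ∃ m, (((n : Int) - 1, (n : Int) - 1) : Int × Int)
                ∈ (pvF thresh (n : Int) man)^[m] (pvF thresh (n : Int) man V) := by
            constructor
            · rintro ⟨m, hm⟩
              cases m with
              | zero => exact ⟨0, hsubFV hm⟩
              | succ m => exact ⟨m, by rwa [Function.iterate_succ_apply] at hm⟩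
            · rintro ⟨m, hm⟩
              exact ⟨m + 1, by rwa [Function.iterate_succ_apply]⟩
          rw [htrans]
          apply ih L vis' (pvF thresh (n : Int) man V) hrep'
            (pvF_subset_grid hVg) hnd'
            (by rw [hset2]; exact Finset.sdiff_subset)
            hth'
            ?closed ?endq ?fuel
          case closed =>
            rw [hset2]
            have : pvF thresh (n : Int) man V \ (pvF thresh (n : Int) man V \ V) = V := by
              ext x
              simp only [Finset.mem_sdiff]
              constructor
              · rintro ⟨h1, h2⟩
                by_contra hx
                exact h2 ⟨h1, hx⟩
              · intro hx
                exact ⟨hsubFV hx, fun h => h.2 hx⟩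
            rw [this]
          case endq =>
            intro hc
            rw [hset2]
            exact Finset.mem_sdiff.2 ⟨hc, hendV⟩
          case fuel =>
            by_cases hVV : pvF thresh (n : Int) man V = V
            · right
              refine ⟨?_, ?_⟩
              · have : (pvCoords L).toFinset = ∅ := by
                  rw [hset2, hVV]
                  simp
                have hcl : pvCoords L = [] := by
                  rwa [List.toFinset_eq_empty_iff] at this
                unfold pvCoords at hcl
                exact List.map_eq_nil_iff.1 hcl
              · rcases hfuel with h | ⟨h, _⟩
                · omega
                · exact absurd h hqe
            · left
              have hss : V ⊂ pvF thresh (n : Int) man V :=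
                HasSubset.Subset.ssubset_of_ne hsubFV (Ne.symm hVV)
              have := Finset.card_lt_card hss
              rcases hfuel with h | ⟨h, _⟩
              · omega
              · exact absurd h hqe

lemma pvVisRep_init {n : ℕ} :
    pvVisRep n (List.replicate n (List.replicate n (0 : Int))) (∅ : Finset (Int × Int)) := by
  refine ⟨by simp, by intro row hrow; rw [List.eq_of_mem_replicate hrow]; simp, ?_⟩
  intro i j hi0 hiN hj0 hjN
  rw [pvGet2_eq_getElem (by simp) (by intro row hrow; rw [List.eq_of_mem_replicate hrow]; simp)
    hi0 hiN hj0 hjN]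
  simp

lemma pvF_empty (thresh N : Int) (man : List (List Int)) :
    pvF thresh N man (∅ : Finset (Int × Int)) = ∅ := by
  unfold pvF
  simp

lemma bfs_eq (thresh : Int) (man : List (List Int)) (hn : 1 ≤ man.length)
    (hg : ¬ pvGet2 man 0 0 < thresh) :
    (bfs thresh man = true ↔
      ∃ m, (((man.length : Int) - 1, (man.length : Int) - 1) : Int × Int)
        ∈ (pvF thresh (man.length : Int) man)^[m] {((0 : Int), (0 : Int))}) := by
  unfold bfs
  rw [if_neg hg]
  have hrep0 : pvVisRep man.length
      (pvVisSet (List.replicate man.length (List.replicate man.length (0 : Int))) 0 0)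
      {((0 : Int), (0 : Int))} := by
    have := pvVisRep_set (n := man.length) pvVisRep_init
      (i := 0) (j := 0) (by omega) (by exact_mod_cast hn) (by omega) (by exact_mod_cast hn)
    simpa using this
  apply pvLoop_spec _ _ _ _ hrep0
  · intro c hc
    rw [Finset.mem_singleton] at hc
    subst hc
    rw [mem_pvGrid]
    dsimp only
    have : (1 : Int) ≤ (man.length : Int) := by exact_mod_cast hn
    exact ⟨le_refl _, by omega, le_refl _, by omega⟩
  · simp [pvCoords]
  · simp [pvCoords]
  · intro e he
    rcases List.mem_singleton.1 he with rfl
    dsimp only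
    omega
  · have : ({((0 : Int), (0 : Int))} : Finset (Int × Int))
        \ (pvCoords [((0 : Int), (0 : Int), pvGet2 man 0 0)]).toFinset = ∅ := by
      simp [pvCoords]
    rw [this, pvF_empty]
    exact Finset.empty_subset _
  · intro hc
    rw [Finset.mem_singleton] at hc
    simp [pvCoords, hc]
  · left
    rw [Finset.card_singleton]
    omega

theorem bfs_agree (thresh : Int) (man : List (List Int)) (hne : man ≠ []) :
    bfs thresh man = bfs_alt thresh man := by
  have hn : 1 ≤ man.length := by
    cases man with
    | nil => exact absurd rfl hne
    | cons r t => simp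
  by_cases hg : pvGet2 man 0 0 < thresh
  · unfold bfs bfs_alt
    rw [if_pos hg, if_pos hg]
  · rw [bfs_alt_eq thresh man hn hg]
    rw [Bool.eq_iff_iff, bfs_eq thresh man hn hg]
    rw [exists_mem_iterate_iff thresh man man.length
      (by intro c hc
          rw [Finset.mem_singleton] at hc
          subst hc
          rw [mem_pvGrid]
          dsimp only
          have : (1 : Int) ≤ (man.length : Int) := by exact_mod_cast hn
          exact ⟨le_refl _, by omega, le_refl _, by omega⟩)
      (by simp) _]
    simp

-- ===== VERDICT (by name: the statement is the Claim_ definition above) =====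
theorem bfs_spec : Claim_equal_bfs := by
  intro thresh manhattan _hDom hPre
  unfold Spec_bfs
  exact bfs_agree thresh manhattan hPre.1
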